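-- pv_equiv track=rewrite | github.com/miliar/Code_Jam_Webscraper | solutions_python/solutions_year14_round4_nr4/90.py | nodesnum
-- ===== SOURCE A (Python) =====
-- def diff(a, b):
-- 	for num, p in enumerate(zip(a, b)):
-- 		x, y = p
-- 		if x != y:
-- 			return num
-- 	return min(len(a), len(b))
--
-- def nodesnum(s):
-- 	if not s:
-- 		return 0
-- 	num = 1
-- 	s.sort()
-- 	if s:
-- 		num += len(s[0])
--
-- 	for a, b in zip(s[:-1], s[1:]):
-- 		num += len(b)-diff(a,b)
--
-- 	return num
-- ===== SOURCE B (Python) =====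
-- def nodesnum(s):
--     # Count of trie nodes = 1 (root) + number of distinct non-empty prefixes.
--     if not s:
--         return 0
--     prefixes = set()
--     for w in s:
--         for i in range(1, len(w) + 1):
--             prefixes.add(w[:i])
--     return 1 + len(prefixes)
-- ===== Notes on version B (the rewrite author's own statement) =====
-- stated objective: simpler
-- what changed: Instead of sorting the list and summing len(b)-lcp(a,b) over consecutive sorted neighbours, B collects the set of all non-empty prefixes directly and returns 1 + its size; no sort, no pairwise lcp scan (A also sorts its argument in place, B leaves it untouched).
import Mathlib
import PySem

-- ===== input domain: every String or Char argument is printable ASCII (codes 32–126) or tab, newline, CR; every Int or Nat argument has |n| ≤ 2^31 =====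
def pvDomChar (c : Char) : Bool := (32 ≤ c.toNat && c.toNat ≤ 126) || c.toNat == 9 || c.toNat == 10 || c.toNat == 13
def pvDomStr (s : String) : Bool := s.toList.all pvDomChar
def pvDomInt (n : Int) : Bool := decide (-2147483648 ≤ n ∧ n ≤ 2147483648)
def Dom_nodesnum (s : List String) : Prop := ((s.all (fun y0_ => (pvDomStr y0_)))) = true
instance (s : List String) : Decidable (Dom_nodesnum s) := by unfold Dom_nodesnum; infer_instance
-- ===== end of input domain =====

-- B counts trie nodes as 1 + |set of non-empty prefixes| instead of sorting and summing
-- len(b)-lcp(a,b) over consecutive neighbours (simpler; note: A sorts its argument in place,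
-- B does not — the equivalence proved here is about the return value).

-- ===== PORT A =====
-- diff(a, b): enumerate(zip(a, b)), return first mismatch index, else min(len(a), len(b))
def nodesnumDiffLoop (ps : List (Char × Char)) (num : Nat) : Option Nat :=
  match ps with
  | [] => none
  | (x, y) :: t => if x ≠ y then some num else nodesnumDiffLoop t (num + 1)

def nodesnumDiff (a b : String) : Int :=
  match nodesnumDiffLoop (List.zip a.toList b.toList) 0 with
  | some n => (n : Int)
  | none => min (PySem.Str.len a) (PySem.Str.len b)

def nodesnum (s : List String) : Int :=
  if s = [] then 0
  else
    let num : Int := 1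
    let t := PySem.List.sorted s (fun x => x) false
    let num := if t = [] then num else num + PySem.Str.len (PySem.List.pyGetD t 0 "")
    (List.zip (PySem.List.slice t none (some (-1))) (PySem.List.slice t (some 1) none)).foldl
      (fun n p => n + PySem.Str.len p.2 - nodesnumDiff p.1 p.2) num

-- ===== PORT B =====
def nodesnum_alt (s : List String) : Int :=
  if s = [] then 0
  else
    let prefixes : PySem.Set String := s.foldl
      (fun acc w =>
        (PySem.List.pyRange 1 (PySem.Str.len w + 1) 1).foldl
          (fun acc2 i => PySem.Set.add acc2 (PySem.Str.slice w none (some i))) acc)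
      PySem.Set.empty
    1 + PySem.Set.len prefixes

-- ===== PRECONDITION & SPEC =====
def Spec_nodesnum (s : List String) (out : Int) : Prop := out = nodesnum_alt s
instance (s : List String) (out : Int) : Decidable (Spec_nodesnum s out) := by unfold Spec_nodesnum; infer_instance

-- ===== CLAIM (what is proved, stated in full; the proofs are below) =====
def Claim_equal_nodesnum : Prop := ∀ (s : List String), Dom_nodesnum s → Spec_nodesnum s (nodesnum s)

-- ===== LEMMAS AND PROOFS =====

-- length of the longest common prefix
def lcpN : List Char → List Char → Nat
  | a :: as, b :: bs => if a = b then lcpN as bs + 1 else 0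
  | _, _ => 0

-- the set of non-empty prefixes of one string / of all strings in a list
def Pw (w : String) : Finset String :=
  ((List.range w.toList.length).map (fun i => String.ofList (w.toList.take (i + 1)))).toFinset

def PF : List String → Finset String
  | [] => ∅
  | w :: r => Pw w ∪ PF r

-- A's pairwise sum over consecutive neighbours, mathematically
def sumA : List String → Int
  | a :: b :: r => ((b.toList.length : Int) - (lcpN a.toList b.toList : Int)) + sumA (b :: r)
  | _ => 0

-- basic lcp facts
theorem lcpN_le_left : ∀ a b : List Char, lcpN a b ≤ a.length := by
  intro a
  induction a with
  | nil => intro b; cases b <;> simp [lcpN]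
  | cons c as ih =>
    intro b
    cases b with
    | nil => simp [lcpN]
    | cons d bs =>
      simp only [lcpN, List.length_cons]
      split
      · exact Nat.add_le_add_right (ih bs) 1
      · omega

theorem lcpN_self : ∀ a : List Char, lcpN a a = a.length := by
  intro a
  induction a with
  | nil => simp [lcpN]
  | cons c as ih => simp [lcpN, ih]

theorem take_lcpN_eq : ∀ a b : List Char, a.take (lcpN a b) = b.take (lcpN a b) := by
  intro a
  induction a with
  | nil => intro b; cases b <;> simp [lcpN]
  | cons c as ih =>
    intro b
    cases b with
    | nil => simp [lcpN]
    | cons d bs =>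
      simp only [lcpN]
      split
      · rename_i h; simp [List.take_succ_cons, h, ih bs]
      · simp

theorem length_le_lcpN_of_prefix : ∀ (p a b : List Char), p <+: a → p <+: b → p.length ≤ lcpN a b := by
  intro p
  induction p with
  | nil => intro a b _ _; simp
  | cons c ps ih =>
    intro a b hpa hpb
    obtain ⟨ta, rfl⟩ := hpa
    obtain ⟨tb, hb⟩ := hpb
    cases b with
    | nil => simp at hb
    | cons d bs =>
      simp only [List.cons_append] at hb
      obtain ⟨rfl, hb2⟩ := List.cons.inj hb
      simp only [List.cons_append, lcpN, List.length_cons, if_true]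
      exact Nat.add_le_add_right (ih _ _ ⟨ta, rfl⟩ ⟨tb, hb2⟩) 1

theorem lcpN_le_of_lex : ∀ a y x : List Char, List.Lex (· < ·) a y → List.Lex (· < ·) y x →
    lcpN a x ≤ lcpN a y := by
  intro a
  induction a with
  | nil => intro y x _ _; cases x <;> simp [lcpN]
  | cons c as ih =>
    intro y x h1 h2
    cases h1 with
    | rel hcd =>
      rename_i d ys
      cases h2 with
      | rel hde =>
        rename_i e xs
        have : c ≠ e := by intro h; subst h; exact absurd (lt_trans hcd hde) (lt_irrefl c)
        simp [lcpN, this]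
      | cons h2' =>
        have : c ≠ d := ne_of_lt hcd
        simp [lcpN, this]
    | cons h1' =>
      rename_i ys
      cases h2 with
      | rel hce =>
        rename_i e xs
        have : c ≠ e := ne_of_lt hce
        simp [lcpN, this]
      | cons h2' =>
        rename_i xs
        simp only [lcpN, if_true]
        exact Nat.add_le_add_right (ih ys xs h1' h2') 1

theorem lcpN_le_of_le (a y x : String) (h1 : a ≤ y) (h2 : y ≤ x) :
    lcpN a.toList x.toList ≤ lcpN a.toList y.toList := by
  rcases Std.le_iff_lt_or_eq.mp h1 with h1' | rfl
  · rcases Std.le_iff_lt_or_eq.mp h2 with h2' | rfl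
    · exact lcpN_le_of_lex _ _ _
        (List.lex_lt.mpr (String.lt_iff_toList_lt.mp h1'))
        (List.lex_lt.mpr (String.lt_iff_toList_lt.mp h2'))
    · exact le_refl _
  · rw [lcpN_self]
    exact lcpN_le_left _ _

-- diff = lcp
theorem diffLoop_eq : ∀ (la lb : List Char) (num : Nat),
    nodesnumDiffLoop (List.zip la lb) num =
      if lcpN la lb = min la.length lb.length then none else some (num + lcpN la lb) := by
  intro la
  induction la with
  | nil => intro lb num; cases lb <;> simp [nodesnumDiffLoop, lcpN]
  | cons c as ih =>
    intro lb num
    cases lb with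
    | nil => simp [nodesnumDiffLoop, lcpN]
    | cons d bs =>
      by_cases h : c = d
      · subst h
        simp only [List.zip_cons_cons, nodesnumDiffLoop, ne_eq, not_true_eq_false, if_false,
          ih bs (num + 1), lcpN, List.length_cons]
        by_cases h2 : lcpN as bs = min as.length bs.length
        · simp [h2, Nat.succ_min_succ]
        · have : ¬ (lcpN as bs + 1 = min (as.length + 1) (bs.length + 1)) := by
            rw [Nat.succ_min_succ]; omega
          simp [h2]; omega
      · simp [nodesnumDiffLoop, h, lcpN, Nat.succ_min_succ]

theorem nodesnumDiff_eq (a b : String) : nodesnumDiff a b = (lcpN a.toList b.toList : Int) := by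
  unfold nodesnumDiff
  rw [diffLoop_eq]
  by_cases h : lcpN a.toList b.toList = min a.toList.length b.toList.length
  · simp only [if_pos h]
    simp [pysem, h, Nat.cast_min]
  · have h' : lcpN a.toList b.toList ≠ min a.length b.length := by
      simpa [String.length_toList] using h
    simp [h']

-- membership / cardinality of the prefix sets
theorem mem_Pw (p w : String) : p ∈ Pw w ↔ p.toList ≠ [] ∧ p.toList <+: w.toList := by
  unfold Pw
  rw [List.mem_toFinset, List.mem_map]
  constructor
  · rintro ⟨i, hi, rfl⟩
    rw [List.mem_range] at hi
    constructor
    · intro h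
      rw [String.toList_ofList] at h
      have := congrArg List.length h
      rw [List.length_take] at this
      simp only [List.length_nil] at this
      omega
    · simp only [String.toList_ofList]
      exact List.take_prefix _ _
  · rintro ⟨hne, hpre⟩
    refine ⟨p.toList.length - 1, ?_, ?_⟩
    · rw [List.mem_range]
      have h1 := hpre.length_le
      have h2 : p.toList.length ≠ 0 := by simpa using hne
      omega
    · have h2 : p.toList.length ≠ 0 := by simpa using hne
      have : p.toList.length - 1 + 1 = p.toList.length := by omega
      rw [this, ← List.prefix_iff_eq_take.mp hpre]
      exact String.ofList_toList

theorem card_Pw (w : String) : (Pw w).card = w.toList.length := by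
  unfold Pw
  rw [List.toFinset_card_of_nodup, List.length_map, List.length_range]
  refine List.Nodup.map_on ?_ (List.nodup_range)
  intro i hi j hj hij
  rw [List.mem_range] at hi hj
  have := congrArg (fun s => s.toList.length) hij
  simp only [String.toList_ofList, List.length_take] at this
  omega

theorem mem_PF (p : String) : ∀ l, p ∈ PF l ↔ ∃ w ∈ l, p ∈ Pw w := by
  intro l
  induction l with
  | nil => simp [PF]
  | cons w r ih => simp [PF, ih]

theorem PF_perm {l l' : List String} (h : l.Perm l') : PF l = PF l' := by
  ext p
  rw [mem_PF, mem_PF]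
  constructor <;> rintro ⟨w, hw, hp⟩
  · exact ⟨w, h.mem_iff.mp hw, hp⟩
  · exact ⟨w, h.mem_iff.mpr hw, hp⟩

-- the counting step and the A-side count
theorem card_PF_cons (a b : String) (r : List String)
    (hp : (a :: b :: r).Pairwise (· ≤ ·)) :
    (PF (a :: b :: r)).card + lcpN a.toList b.toList
      = a.toList.length + (PF (b :: r)).card := by
  have hab : a ≤ b := (List.pairwise_cons.mp hp).1 b (by simp)
  have hax : ∀ x ∈ b :: r, a ≤ x := (List.pairwise_cons.mp hp).1
  have hbx : ∀ x ∈ r, b ≤ x := (List.pairwise_cons.mp (List.pairwise_cons.mp hp).2).1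
  set k := lcpN a.toList b.toList with hk
  -- the intersection is exactly the non-empty prefixes of a.take k
  have hinter : Pw a ∩ PF (b :: r) = Pw (String.ofList (a.toList.take k)) := by
    ext p
    rw [Finset.mem_inter, mem_Pw, mem_PF, mem_Pw, String.toList_ofList]
    constructor
    · rintro ⟨⟨hne, hpa⟩, w, hw, hpw⟩
      rw [mem_Pw] at hpw
      refine ⟨hne, ?_⟩
      have h1 : p.toList.length ≤ lcpN a.toList w.toList :=
        length_le_lcpN_of_prefix _ _ _ hpa hpw.2
      have h2 : lcpN a.toList w.toList ≤ k := by
        rw [List.mem_cons] at hw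
        rcases hw with rfl | hw
        · exact le_refl _
        · exact lcpN_le_of_le a b w hab (hbx w hw)
      rw [List.prefix_take_iff]
      exact ⟨hpa, by omega⟩
    · rintro ⟨hne, hpre⟩
      have hpa : p.toList <+: a.toList := hpre.trans (List.take_prefix _ _)
      refine ⟨⟨hne, hpa⟩, b, by simp, ?_⟩
      rw [mem_Pw]
      refine ⟨hne, ?_⟩
      have : p.toList <+: b.toList.take k := by rw [← take_lcpN_eq]; exact hpre
      exact this.trans (List.take_prefix _ _)
  have hcardInter : (Pw a ∩ PF (b :: r)).card = k := by
    rw [hinter, card_Pw, String.toList_ofList, List.length_take]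
    have := lcpN_le_left a.toList b.toList
    omega
  have := Finset.card_union_add_card_inter (Pw a) (PF (b :: r))
  show (Pw a ∪ PF (b :: r)).card + k = a.toList.length + (PF (b :: r)).card
  rw [hcardInter, card_Pw] at this
  omega

theorem card_PF_sorted : ∀ (r : List String) (a : String), (a :: r).Pairwise (· ≤ ·) →
    ((PF (a :: r)).card : Int) = (a.toList.length : Int) + sumA (a :: r) := by
  intro r
  induction r with
  | nil =>
    intro a _
    show ((Pw a ∪ ∅).card : Int) = _
    simp [card_Pw, sumA]
  | cons b r' ih =>
    intro a hp
    have step := card_PF_cons a b r' hp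
    have ihb := ih b (List.pairwise_cons.mp hp).2
    show ((PF (a :: b :: r')).card : Int) = _
    have : ((PF (a :: b :: r')).card : Int) + (lcpN a.toList b.toList : Int)
        = (a.toList.length : Int) + ((PF (b :: r')).card : Int) := by exact_mod_cast congrArg Nat.cast step
    rw [ihb] at this
    show _ = (a.toList.length : Int) + sumA (a :: b :: r')
    simp only [sumA]
    omega

-- A's fold equals init + sumA
theorem foldA_eq : ∀ (t : List String) (init : Int),
    (List.zip t.dropLast t.tail).foldl
      (fun n p => n + PySem.Str.len p.2 - nodesnumDiff p.1 p.2) init = init + sumA t := by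
  intro t
  induction t with
  | nil => intro init; simp [sumA]
  | cons a t ih =>
    cases t with
    | nil => intro init; simp [sumA]
    | cons b r =>
      intro init
      have hdl : (a :: b :: r).dropLast = a :: (b :: r).dropLast := by
        simp [List.dropLast_cons₂]
      rw [hdl]
      show (List.zip (a :: (b :: r).dropLast) (b :: r)).foldl _ init = _
      have hzip : List.zip (a :: (b :: r).dropLast) (b :: r)
          = (a, b) :: List.zip ((b :: r).dropLast) r := by simp [List.zip_cons_cons]
      rw [hzip, List.foldl_cons]
      have := ih (init + PySem.Str.len b - nodesnumDiff a b)
      simp only [List.tail_cons] at this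
      rw [this]
      simp only [sumA, nodesnumDiff_eq]
      have hlb : PySem.Str.len b = (b.toList.length : Int) := by simp [pysem]
      rw [hlb]
      ring

-- B's fold: membership, nodup, and the resulting counts
theorem slice_mem_Pw (w y : String) :
    (∃ i ∈ PySem.List.pyRange 1 (PySem.Str.len w + 1) 1, y = PySem.Str.slice w none (some i)) ↔
      y ∈ Pw w := by
  constructor
  · rintro ⟨i, hi, rfl⟩
    rw [PySem.List.mem_pyRange_one] at hi
    rw [mem_Pw]
    have h0 : (0:Int) ≤ i := by omega
    have hlen : PySem.Str.len w = (w.toList.length : Int) := by simp [pysem]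
    have htl : (PySem.Str.slice w none (some i)).toList = w.toList.take i.toNat := by
      rw [PySem.Str.toList_slice, PySem.Chars.slice_eq_listSlice, PySem.List.slice_to _ h0]
    rw [htl]
    rw [hlen] at hi
    constructor
    · intro h
      have hlen2 := congrArg List.length h
      rw [List.length_take] at hlen2
      simp only [List.length_nil] at hlen2
      omega
    · exact List.take_prefix _ _
  · intro hy
    rw [mem_Pw] at hy
    obtain ⟨hne, hpre⟩ := hy
    refine ⟨(y.toList.length : Int), ?_, ?_⟩
    · rw [PySem.List.mem_pyRange_one]
      have h1 := hpre.length_le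
      have h2 : y.toList.length ≠ 0 := by simpa using hne
      have hlen : PySem.Str.len w = (w.toList.length : Int) := by simp [pysem]
      omega
    · apply String.toList_inj.mp
      rw [PySem.Str.toList_slice, PySem.Chars.slice_eq_listSlice,
        PySem.List.slice_to _ (by positivity), Int.toNat_natCast]
      exact List.prefix_iff_eq_take.mp hpre

theorem foldB_mem : ∀ (l : List String) (acc : PySem.Set String) (y : String),
    (y ∈ l.foldl
      (fun acc w =>
        (PySem.List.pyRange 1 (PySem.Str.len w + 1) 1).foldl
          (fun acc2 i => PySem.Set.add acc2 (PySem.Str.slice w none (some i))) acc)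
      acc) ↔ y ∈ acc ∨ ∃ w ∈ l, y ∈ Pw w := by
  intro l
  induction l with
  | nil => simp
  | cons w r ih =>
    intro acc y
    rw [List.foldl_cons, ih]
    rw [PySem.Set.mem_foldl_add]
    rw [slice_mem_Pw w y]
    simp only [List.mem_cons]
    constructor
    · rintro ((hy | hyp) | ⟨v, hv, hvp⟩)
      · exact Or.inl hy
      · exact Or.inr ⟨w, Or.inl rfl, hyp⟩
      · exact Or.inr ⟨v, Or.inr hv, hvp⟩
    · rintro (hy | ⟨v, rfl | hv, hvp⟩)
      · exact Or.inl (Or.inl hy)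
      · exact Or.inl (Or.inr hvp)
      · exact Or.inr ⟨v, hv, hvp⟩

theorem foldB_nodup : ∀ (l : List String) (acc : PySem.Set String), acc.Nodup →
    (l.foldl
      (fun acc w =>
        (PySem.List.pyRange 1 (PySem.Str.len w + 1) 1).foldl
          (fun acc2 i => PySem.Set.add acc2 (PySem.Str.slice w none (some i))) acc)
      acc).Nodup := by
  have inner : ∀ (li : List Int) (f : Int → String) (acc : PySem.Set String), acc.Nodup →
      (li.foldl (fun a i => PySem.Set.add a (f i)) acc).Nodup := by
    intro li f
    induction li with
    | nil => intro acc h; exact h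
    | cons i t ih => intro acc h; exact ih _ (PySem.Set.nodup_add acc (f i) h)
  intro l
  induction l with
  | nil => intro acc h; exact h
  | cons w r ih =>
    intro acc h
    exact ih _ (inner _ _ _ h)

theorem nodesnum_alt_eq (s : List String) (hs : s ≠ []) :
    nodesnum_alt s = 1 + ((PF s).card : Int) := by
  unfold nodesnum_alt
  rw [if_neg hs]
  set F := s.foldl
      (fun acc w =>
        (PySem.List.pyRange 1 (PySem.Str.len w + 1) 1).foldl
          (fun acc2 i => PySem.Set.add acc2 (PySem.Str.slice w none (some i))) acc)
      PySem.Set.empty with hF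
  have hnd : F.Nodup := foldB_nodup s PySem.Set.empty (by simp [PySem.Set.empty])
  have hfin : F.toFinset = PF s := by
    ext y
    rw [List.mem_toFinset, hF, foldB_mem, mem_PF]
    simp [PySem.Set.empty]
  have hcard : F.length = (PF s).card := by
    rw [← hfin, List.toFinset_card_of_nodup hnd]
  show 1 + PySem.Set.len F = _
  have : PySem.Set.len F = (F.length : Int) := by simp [PySem.Set.len, pysem]
  rw [this, hcard]

theorem nodesnum_eq (s : List String) (hs : s ≠ []) :
    nodesnum s = 1 + ((PF s).card : Int) := by
  unfold nodesnum
  rw [if_neg hs]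
  set t := PySem.List.sorted s (fun x => x) false with ht
  have htne : t ≠ [] := by
    rw [ht, Ne, PySem.List.sorted_eq_nil_iff]
    exact hs
  obtain ⟨h, r, hhr⟩ := List.exists_cons_of_ne_nil htne
  have hperm : t.Perm s := PySem.List.sorted_perm s (fun x => x) false
  have hpair : t.Pairwise (· ≤ ·) := PySem.List.sorted_pairwise s (fun x => x)
  rw [PF_perm hperm.symm]
  have hcount := card_PF_sorted r h (hhr ▸ hpair)
  have hget : PySem.List.pyGetD t 0 "" = h := by
    rw [hhr]; exact PySem.List.pyGetD_zero_cons h r ""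
  have hlh : PySem.Str.len h = (h.toList.length : Int) := by simp [pysem]
  simp only [PySem.List.slice_to_neg_one, PySem.List.slice_from_one, if_neg htne, hget, hlh]
  rw [foldA_eq, hhr, hcount]
  ring

-- ===== VERDICT (by name: the statement is the Claim_ definition above) =====
theorem nodesnum_spec : Claim_equal_nodesnum := by
  intro s _
  unfold Spec_nodesnum
  by_cases hs : s = []
  · subst hs; rfl
  · rw [nodesnum_eq s hs, nodesnum_alt_eq s hs]
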